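-- pv_equiv track=rewrite | github.com/texikator/algo_and_structures_python | 7.py | replace_max
-- ===== SOURCE A (Python) =====
-- def replace_max(num, result, max):
--     max_idx = 0
--     max = result[max_idx]
--     for idx, val in enumerate(result):
--         if max <= val:
--             max = val
--             max_idx = idx
--     if num <= max:
--         result[max_idx] = num
--     return result
-- ===== SOURCE B (Python) =====
-- def replace_max(num, result, max):
--     # pass 1: just the maximum value (parameter `max` shadows the builtin)
--     m = result[0]
--     for v in result:
--         if v > m:
--             m = v
--     # pass 2: locate the LAST occurrence of that maximum and overwrite it
--     if num <= m:
--         for i in reversed(range(len(result))):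
--             if result[i] == m:
--                 result[i] = num
--                 break
--     return result
-- ===== Notes on version B (the rewrite author's own statement) =====
-- stated objective: alternative
-- what changed: A's single pass tracking a (value,index) pair is split into two separately-shaped passes: a value-only forward maximum, then a backward scan that overwrites the last occurrence of that maximum and breaks.
import Mathlib
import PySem

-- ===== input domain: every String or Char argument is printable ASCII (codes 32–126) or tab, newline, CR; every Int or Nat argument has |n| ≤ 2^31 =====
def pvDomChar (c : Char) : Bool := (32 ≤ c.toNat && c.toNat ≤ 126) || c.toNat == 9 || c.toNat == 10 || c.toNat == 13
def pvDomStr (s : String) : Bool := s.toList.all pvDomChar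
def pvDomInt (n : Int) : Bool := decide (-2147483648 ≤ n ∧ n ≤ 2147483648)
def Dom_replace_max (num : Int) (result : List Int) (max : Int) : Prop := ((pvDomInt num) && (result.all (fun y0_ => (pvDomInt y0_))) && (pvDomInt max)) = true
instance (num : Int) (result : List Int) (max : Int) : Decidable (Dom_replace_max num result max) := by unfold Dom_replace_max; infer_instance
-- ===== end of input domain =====

-- ===== PORT A =====
-- B replaces A's single (value,index)-tracking pass by a value-only forward maximum
-- followed by a backward scan for its last occurrence. Both mutate `result` in place in
-- Python; the equivalence proved here is about the return value.
def replace_max (num : Int) (result : List Int) (max : Int) : List Int :=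
  -- max = result[0]  (IndexError on empty input; excluded by Pre_)
  match PySem.List.pyGet? result 0 with
  | none => result
  | some m0 =>
    let st := (PySem.List.enumerate result 0).foldl
      (fun (s : Int × Int) (p : Int × Int) => if s.1 ≤ p.2 then (p.2, p.1) else s)
      (m0, 0)
    if num ≤ st.1 then PySem.List.pySetD result st.2 num else result

-- ===== PORT B =====
-- `for i in reversed(range(len(result)))` with break: first hit from the back wins
def bScan (num m : Int) (result : List Int) : List Nat → List Int
  | [] => result
  | i :: rest => if result.getD i 0 = m then result.set i num else bScan num m result rest

def replace_max_alt (num : Int) (result : List Int) (max : Int) : List Int :=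
  match result with
  | [] => result   -- result[0] raises in Python; excluded by Pre_
  | h :: t =>
    let m := t.foldl (fun a v => if v > a then v else a) h
    if num ≤ m then bScan num m result ((List.range result.length).reverse) else result

-- ===== PRECONDITION & SPEC =====
-- Pre_ excludes only the empty list, on which A raises IndexError (result[0]).
def Pre_replace_max (num : Int) (result : List Int) (max : Int) : Prop := result ≠ []
instance (num : Int) (result : List Int) (max : Int) : Decidable (Pre_replace_max num result max) := by
  unfold Pre_replace_max; infer_instance
def pvWitness_replace_max : Int × List Int × Int := (2, [1, 3, 3, 2], 0)

def Spec_replace_max (num : Int) (result : List Int) (max : Int) (out : List Int) : Prop := out = replace_max_alt num result max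
instance (num : Int) (result : List Int) (max : Int) (out : List Int) : Decidable (Spec_replace_max num result max out) := by unfold Spec_replace_max; infer_instance

-- ===== CLAIM (what is proved, stated in full; the proofs are below) =====
def Claim_equal_replace_max : Prop := ∀ (num : Int) (result : List Int) (max : Int), Dom_replace_max num result max → Pre_replace_max num result max → Spec_replace_max num result max (replace_max num result max)

-- ===== LEMMAS AND PROOFS =====

-- index (from the front) of the LAST occurrence of M, meaningful when M ∈ l
def lastEq (l : List Int) (M : Int) : Nat :=
  match l with
  | [] => 0
  | _ :: t => if M ∈ t then lastEq t M + 1 else 0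

theorem lastEq_lt_length (l : List Int) (M : Int) (h : M ∈ l) : lastEq l M < l.length := by
  induction l with
  | nil => cases h
  | cons a t ih =>
    simp only [lastEq, List.length_cons]
    by_cases ht : M ∈ t
    · simp only [ht, if_true]
      have := ih ht
      omega
    · simp [ht]

theorem getD_lastEq (l : List Int) (M : Int) (h : M ∈ l) : l.getD (lastEq l M) 0 = M := by
  induction l with
  | nil => cases h
  | cons a t ih =>
    simp only [lastEq]
    by_cases ht : M ∈ t
    · simp only [ht, if_true, List.getD_cons_succ]; exact ih ht
    · have ha : M = a := by
        rcases List.mem_cons.mp h with h1 | h1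
        · exact h1
        · exact absurd h1 ht
      simp [ht, ha.symm]

theorem getD_ne_of_gt_lastEq (l : List Int) (M : Int) (j : Nat)
    (h1 : lastEq l M < j) (h2 : j < l.length) : l.getD j 0 ≠ M := by
  induction l generalizing j with
  | nil => simp at h2
  | cons a t ih =>
    obtain ⟨j', rfl⟩ : ∃ j', j = j' + 1 := ⟨j - 1, by
      have : 0 < j := Nat.lt_of_le_of_lt (Nat.zero_le _) h1; omega⟩
    have hj' : j' < t.length := by simp only [List.length_cons] at h2; omega
    simp only [List.getD_cons_succ]
    by_cases ht : M ∈ t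
    · simp only [lastEq, ht, if_true] at h1
      exact ih j' (by omega) hj'
    · intro hc
      have hmem : t.getD j' 0 ∈ t := by
        rw [List.getD_eq_getElem _ _ hj']; exact List.getElem_mem hj'
      exact ht (hc ▸ hmem)

-- both loop bodies compute the running maximum
theorem foldA_max_eq (t : List Int) (init : Int) :
    t.foldl (fun a v => if a ≤ v then v else a) init = t.foldl Max.max init := by
  induction t generalizing init with
  | nil => rfl
  | cons a t ih =>
    simp only [List.foldl_cons]
    have hstep : (if init ≤ a then a else init) = Max.max init a := by rw [max_def]
    rw [hstep, ih]

theorem foldB_max_eq (t : List Int) (init : Int) :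
    t.foldl (fun a v => if v > a then v else a) init = t.foldl Max.max init := by
  induction t generalizing init with
  | nil => rfl
  | cons a t ih =>
    simp only [List.foldl_cons]
    have hstep : (if a > init then a else init) = Max.max init a := by
      rcases le_or_gt a init with h | h
      · rw [if_neg (by omega), max_eq_left h]
      · rw [if_pos h, max_eq_right (le_of_lt h)]
    rw [hstep, ih]

theorem foldl_max_mem_of_ge (t : List Int) (init x : Int) (hx : x ∈ t) (hge : init ≤ x) :
    t.foldl Max.max init ∈ t := by
  rcases PySem.List.foldl_max_mem t init with h | h
  · have hxle := (PySem.List.le_foldl_max t init).2 x hx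
    have hxeq : x = t.foldl Max.max init := le_antisymm hxle (by rw [h]; exact hge)
    exact hxeq ▸ hx
  · exact h

-- A's fold computes (running max, index of the last element reaching it)
theorem foldA_char (l : List Int) (mx mi k : Int) :
    (PySem.List.enumerate l k).foldl
        (fun (s : Int × Int) (p : Int × Int) => if s.1 ≤ p.2 then (p.2, p.1) else s) (mx, mi)
      = (l.foldl (fun a v => if a ≤ v then v else a) mx,
         if ∀ x ∈ l, x < mx then mi
         else k + (lastEq l (l.foldl (fun a v => if a ≤ v then v else a) mx) : Int)) := by
  induction l generalizing mx mi k with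
  | nil => simp [PySem.List.enumerate_nil]
  | cons a t ih =>
    rw [PySem.List.enumerate_cons]
    simp only [List.foldl_cons]
    by_cases hma : mx ≤ a
    · simp only [if_pos hma]
      rw [ih a k (k + 1)]
      have hnall : ¬ ∀ x ∈ a :: t, x < mx := by
        intro hc; exact absurd (hc a (by simp)) (by omega)
      rw [if_neg hnall]
      set M := t.foldl (fun a v => if a ≤ v then v else a) a with hMdef
      by_cases hall : ∀ x ∈ t, x < a
      · rw [if_pos hall]
        have hMa : M = a := by
          rw [hMdef, foldA_max_eq]
          rcases PySem.List.foldl_max_mem t a with h | h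
          · exact h
          · exact absurd (hall _ h) (by
              have := (PySem.List.le_foldl_max t a).1; omega)
        have hnt : M ∉ t := fun hc => absurd (hall M hc) (by omega)
        have h0 : lastEq (a :: t) M = 0 := by simp only [lastEq, if_neg hnt]
        rw [h0]
        simp
      · rw [if_neg hall]
        push_neg at hall
        obtain ⟨x, hx, hax⟩ := hall
        have hMt : M ∈ t := by
          rw [hMdef, foldA_max_eq]
          exact foldl_max_mem_of_ge t a x hx hax
        simp only [lastEq, hMt, if_true]
        simp only [Prod.mk.injEq]
        exact ⟨by trivial, by push_cast; ring⟩
    · simp only [if_neg hma]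
      rw [ih mx mi (k + 1)]
      set M := t.foldl (fun a v => if a ≤ v then v else a) mx with hMdef
      by_cases hall : ∀ x ∈ t, x < mx
      · have hall' : ∀ x ∈ a :: t, x < mx := by
          intro x hx
          rcases List.mem_cons.mp hx with rfl | hx
          · omega
          · exact hall x hx
        rw [if_pos hall, if_pos hall']
      · rw [if_neg hall]
        have hall' : ¬ ∀ x ∈ a :: t, x < mx :=
          fun hc => hall (fun x hx => hc x (List.mem_cons_of_mem a hx))
        rw [if_neg hall']
        push_neg at hall
        obtain ⟨x, hx, hax⟩ := hall
        have hMt : M ∈ t := by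
          rw [hMdef, foldA_max_eq]
          exact foldl_max_mem_of_ge t mx x hx hax
        simp only [lastEq, hMt, if_true]
        simp only [Prod.mk.injEq]
        exact ⟨by trivial, by push_cast; ring⟩

-- B's backward scan sets exactly the last occurrence of M
theorem bScan_set (num M : Int) (l : List Int) (hM : M ∈ l) :
    ∀ n : Nat, lastEq l M < n → n ≤ l.length →
      bScan num M l ((List.range n).reverse) = l.set (lastEq l M) num := by
  intro n
  induction n with
  | zero => omega
  | succ k ih =>
    intro h1 h2
    rw [List.range_succ, List.reverse_append, List.reverse_singleton, List.singleton_append]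
    simp only [bScan]
    by_cases hk : k = lastEq l M
    · subst hk; rw [if_pos (getD_lastEq l M hM)]
    · rw [if_neg (getD_ne_of_gt_lastEq l M k (by omega) (by omega))]
      exact ih (by omega) (by omega)

-- ===== VERDICT (by name: the statement is the Claim_ definition above) =====
theorem replace_max_spec : Claim_equal_replace_max := by
  intro num result mx _ hpre
  unfold Spec_replace_max
  match result, hpre with
  | h :: t, _ =>
    unfold replace_max replace_max_alt
    have hget : PySem.List.pyGet? (h :: t) 0 = some h := by
      simp [PySem.List.pyGet?, PySem.List.pyIdx?]
    rw [hget]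
    simp only [foldA_char]
    have hstep : (h :: t).foldl (fun a v => if a ≤ v then v else a) h
        = t.foldl (fun a v => if a ≤ v then v else a) h := by
      simp [List.foldl_cons]
    set M := t.foldl (fun a v => if a ≤ v then v else a) h with hMdef
    have hMmem : M ∈ h :: t := by
      rw [hMdef, foldA_max_eq]
      rcases PySem.List.foldl_max_mem t h with hc | hc
      · rw [hc]; exact List.mem_cons_self
      · exact List.mem_cons_of_mem h hc
    have hnall : ¬ ∀ x ∈ h :: t, x < h := fun hc => absurd (hc h (by simp)) (by omega)
    rw [foldB_max_eq, ← foldA_max_eq, hstep]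
    simp only [if_neg hnall, zero_add]
    by_cases hnum : num ≤ M
    · rw [if_pos hnum, if_pos hnum]
      rw [PySem.List.pySetD_natCast]
      exact (bScan_set num M (h :: t) hMmem (h :: t).length
        (lastEq_lt_length (h :: t) M hMmem) le_rfl).symm
    · rw [if_neg hnum, if_neg hnum]
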